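-- pv_equiv track=rewrite | github.com/c1una/get-graphic-drivers | fetch_nvidia_driver.py | parse_product_series
-- ===== SOURCE A (Python) =====
-- def parse_product_series(gpu_info_arr):
--     """
--     Grabs the first two digits from the series number
--     """
--     filtered = []
--     for element in gpu_info_arr[1 : len(gpu_info_arr)]:
--         if element.isnumeric():
--             series = element[0:2]
--             filtered.append(series)
--             break
--         filtered.append(element)
--     return filtered
-- ===== SOURCE B (Python) =====
-- def parse_product_series(gpu_info_arr):
--     """
--     Grabs the first two digits from the series number
--     """
--     rest = gpu_info_arr[1:]
--     idx = next((i for i, e in enumerate(rest) if e.isnumeric()), None)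
--     if idx is None:
--         return rest
--     return rest[:idx] + [rest[idx][0:2]]
-- ===== Notes on version B (the rewrite author's own statement) =====
-- stated objective: alternative
-- what changed: Replaces the accumulate-with-break loop by locating the first numeric element's index and building the result as slice-of-prefix plus the two-char prefix of the boundary element.
import Mathlib
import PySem

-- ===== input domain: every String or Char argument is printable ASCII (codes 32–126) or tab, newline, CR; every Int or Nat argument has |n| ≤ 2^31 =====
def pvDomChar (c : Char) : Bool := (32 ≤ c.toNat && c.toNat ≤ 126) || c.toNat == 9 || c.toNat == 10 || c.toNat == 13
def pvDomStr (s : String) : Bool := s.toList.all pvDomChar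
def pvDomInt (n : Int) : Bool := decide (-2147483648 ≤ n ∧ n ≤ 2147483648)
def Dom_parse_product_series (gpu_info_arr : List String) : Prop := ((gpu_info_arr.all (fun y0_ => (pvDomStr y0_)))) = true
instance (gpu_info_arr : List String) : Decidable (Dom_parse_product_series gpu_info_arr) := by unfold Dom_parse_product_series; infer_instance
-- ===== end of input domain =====

-- B replaces A's accumulate-with-break loop by a find-first-numeric-index then slice construction (alternative decomposition, same cost).
-- str.isnumeric() is ported as PySem.Str.strIsdigit: on the printable-ASCII domain the two predicates coincide (only '0'-'9' qualify).

-- ===== PORT A =====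
-- A's for-loop with break, carrying the `filtered` accumulator (kept reversed, reversed on exit)
def pvALoop : List String → List String → List String
  | [], acc => acc.reverse
  | e :: rest, acc =>
    if PySem.Str.strIsdigit e then
      ((PySem.Str.slice e (some 0) (some 2)) :: acc).reverse
    else
      pvALoop rest (e :: acc)

def parse_product_series (gpu_info_arr : List String) : List String :=
  pvALoop (PySem.List.slice gpu_info_arr (some 1) (some (PySem.List.len gpu_info_arr))) []

-- ===== PORT B =====
def parse_product_series_alt (gpu_info_arr : List String) : List String :=
  let rest := PySem.List.slice gpu_info_arr (some 1) none
  match rest.findIdx? (fun e => PySem.Str.strIsdigit e) with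
  | none => rest
  | some i => rest.take i ++ [PySem.Str.slice (rest.getD i "") (some 0) (some 2)]

-- ===== PRECONDITION & SPEC =====
def Spec_parse_product_series (gpu_info_arr : List String) (out : List String) : Prop := out = parse_product_series_alt gpu_info_arr
instance (gpu_info_arr : List String) (out : List String) : Decidable (Spec_parse_product_series gpu_info_arr out) := by unfold Spec_parse_product_series; infer_instance

-- ===== CLAIM (what is proved, stated in full; the proofs are below) =====
def Claim_equal_parse_product_series : Prop := ∀ (gpu_info_arr : List String), Dom_parse_product_series gpu_info_arr → Spec_parse_product_series gpu_info_arr (parse_product_series gpu_info_arr)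

-- ===== LEMMAS AND PROOFS =====

-- the loop, generalized over the accumulator, equals B's find-then-slice expression
theorem pvALoop_eq (l : List String) : ∀ acc : List String,
    pvALoop l acc =
      acc.reverse ++
        (match l.findIdx? (fun e => PySem.Str.strIsdigit e) with
         | none => l
         | some i => l.take i ++ [PySem.Str.slice (l.getD i "") (some 0) (some 2)]) := by
  induction l with
  | nil => intro acc; simp [pvALoop]
  | cons e rest ih =>
    intro acc
    by_cases h : PySem.Chars.strIsdigit e.toList
    · simp [pvALoop, PySem.Str.strIsdigit, h, List.findIdx?_cons]
    · simp only [pvALoop, PySem.Str.strIsdigit, h, List.findIdx?_cons, ih (e :: acc)]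
      cases hf : rest.findIdx? (fun e => PySem.Chars.strIsdigit e.toList) with
      | none => simp
      | some i => simp

theorem slice_one_len (xs : List String) :
    PySem.List.slice xs (some 1) (some (PySem.List.len xs)) = PySem.List.slice xs (some 1) none := by
  simp [PySem.List.slice, PySem.List.len]

-- ===== VERDICT (by name: the statement is the Claim_ definition above) =====
theorem parse_product_series_spec : Claim_equal_parse_product_series := by
  intro xs _
  unfold Spec_parse_product_series parse_product_series parse_product_series_alt
  rw [slice_one_len, pvALoop_eq]
  simp
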